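-- pv_equiv track=rewrite | github.com/fernandoncidade/Lumen | source/modules/leitor/leitor_acessivel/lta_05_carregar_pdf.py | _reconstruir_paragrafos_pyppdf2
-- ===== SOURCE A (Python) =====
-- def _reconstruir_paragrafos_pyppdf2(raw_text: str) -> str:
--     lines = raw_text.splitlines()
--     paragraphs = []
--     cur = ""
--
--     for line in lines:
--         trimmed = line.strip()
--
--         if trimmed == "":
--             if cur:
--                 paragraphs.append(cur.strip())
--                 cur = ""
--
--             continue
--
--         if trimmed.endswith("-"):
--             piece = trimmed[:-1]
--             if cur:
--                 cur += piece
--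
--             else:
--                 cur = piece
--
--             continue
--
--         leading_tabs = line.startswith("\t")
--         leading_spaces = len(line) - len(line.lstrip(" "))
--         prev_ends_dot = cur.rstrip().endswith(".")
--         starts_upper = bool(trimmed) and trimmed[0].isupper()
--
--         if cur and prev_ends_dot and starts_upper and (leading_tabs or leading_spaces >= 4):
--             cur = cur.rstrip() + "\n" + trimmed
--
--         else:
--             if cur:
--                 cur = cur.rstrip() + " " + trimmed
--
--             else:
--                 cur = trimmed
--
--     if cur:
--         paragraphs.append(cur.strip())
--
--     return "\n\n".join(paragraphs)
-- ===== SOURCE B (Python) =====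
-- def _reconstruir_paragrafos_pyppdf2(raw_text: str) -> str:
--     def merge(cur, line):
--         trimmed = line.strip()
--         if trimmed.endswith("-"):
--             piece = trimmed[:-1]
--             return cur + piece if cur else piece
--         leading_tabs = line.startswith("\t")
--         leading_spaces = len(line) - len(line.lstrip(" "))
--         if (cur and cur.rstrip().endswith(".") and trimmed[0].isupper()
--                 and (leading_tabs or leading_spaces >= 4)):
--             return cur.rstrip() + "\n" + trimmed
--         if cur:
--             return cur.rstrip() + " " + trimmed
--         return trimmed
--
--     blocks = []
--     acc = []
--     for line in raw_text.splitlines():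
--         if line.strip() == "":
--             if acc:
--                 blocks.append(acc)
--                 acc = []
--         else:
--             acc.append(line)
--     if acc:
--         blocks.append(acc)
--
--     paragraphs = []
--     for block in blocks:
--         cur = ""
--         for line in block:
--             cur = merge(cur, line)
--         if cur:
--             paragraphs.append(cur.strip())
--
--     return "\n\n".join(paragraphs)
-- ===== Notes on version B (the rewrite author's own statement) =====
-- stated objective: alternative
-- what changed: A's single flat pass carrying (paragraphs, cur) state is re-decomposed into an outer pass that splits the lines into blank-line-delimited blocks and an inner per-block merge fold; empty merge results are filtered out and the paragraphs joined with a blank-line separator.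
import Mathlib
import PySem

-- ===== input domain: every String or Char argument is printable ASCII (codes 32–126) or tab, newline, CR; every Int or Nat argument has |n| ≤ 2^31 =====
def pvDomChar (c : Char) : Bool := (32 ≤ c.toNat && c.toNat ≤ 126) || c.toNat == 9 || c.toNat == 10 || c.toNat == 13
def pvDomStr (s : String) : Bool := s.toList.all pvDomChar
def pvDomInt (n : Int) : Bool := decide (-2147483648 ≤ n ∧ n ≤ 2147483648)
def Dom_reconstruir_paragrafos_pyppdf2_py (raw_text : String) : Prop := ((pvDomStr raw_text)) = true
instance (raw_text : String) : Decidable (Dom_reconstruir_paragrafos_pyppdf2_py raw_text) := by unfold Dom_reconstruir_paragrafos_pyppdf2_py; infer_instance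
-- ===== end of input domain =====

-- B re-decomposes A's single flat pass into blank-line block splitting plus a per-block merge
-- (objective: alternative decomposition, same cost); return value proved equal on all inputs.

-- ===== PORT A =====
-- one iteration of A's flat loop over lines; state = (paragraphs, cur)
def pvStepA (st : List String × String) (line : String) : List String × String :=
  let trimmed := PySem.Str.strip line
  if trimmed = "" then
    (if st.2 != "" then (st.1 ++ [PySem.Str.strip st.2], "") else st)
  else if PySem.Str.endswith trimmed "-" then
    -- piece = trimmed[:-1]
    (let piece := PySem.Str.slice trimmed none (some (-1));
     if st.2 != "" then (st.1, st.2 ++ piece) else (st.1, piece))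
  else
    let leading_tabs := PySem.Str.startswith line "\t"
    -- len(line) - len(line.lstrip(" ")) = number of leading ' ' characters (exact)
    let leading_spaces := (line.toList.takeWhile (fun c => c == ' ')).length
    let prev_ends_dot := PySem.Str.endswith (PySem.Str.rstrip st.2) "."
    -- bool(trimmed) and trimmed[0].isupper()
    let starts_upper := (trimmed != "") &&
      (match PySem.Str.pyGet? trimmed 0 with | some c => PySem.Chars.isupper c | none => false)
    if st.2 != "" && prev_ends_dot && starts_upper && (leading_tabs || decide (4 ≤ leading_spaces)) then
      (st.1, PySem.Str.rstrip st.2 ++ "\n" ++ trimmed)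
    else if st.2 != "" then
      (st.1, PySem.Str.rstrip st.2 ++ " " ++ trimmed)
    else
      (st.1, trimmed)

def reconstruir_paragrafos_pyppdf2_py (raw_text : String) : String :=
  let lines := PySem.Str.splitlines raw_text
  let st := lines.foldl pvStepA ([], "")
  let paragraphs := if st.2 != "" then st.1 ++ [PySem.Str.strip st.2] else st.1
  PySem.Str.join "\n\n" paragraphs

-- ===== PORT B =====
-- B's inner merge of one (non-blank) line into the current paragraph
def pvMergeB (cur line : String) : String :=
  let trimmed := PySem.Str.strip line
  if PySem.Str.endswith trimmed "-" then
    (let piece := PySem.Str.slice trimmed none (some (-1));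
     if cur != "" then cur ++ piece else piece)
  else
    let leading_tabs := PySem.Str.startswith line "\t"
    let leading_spaces := (line.toList.takeWhile (fun c => c == ' ')).length
    if cur != "" && PySem.Str.endswith (PySem.Str.rstrip cur) "." &&
        (match PySem.Str.pyGet? trimmed 0 with | some c => PySem.Chars.isupper c | none => false) &&
        (leading_tabs || decide (4 ≤ leading_spaces)) then
      PySem.Str.rstrip cur ++ "\n" ++ trimmed
    else if cur != "" then
      PySem.Str.rstrip cur ++ " " ++ trimmed
    else
      trimmed

-- B's block splitter: one iteration; state = (blocks so far, current block)
def pvBlocksStep (st : List (List String) × List String) (line : String) : List (List String) × List String :=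
  if PySem.Str.strip line = "" then
    (if st.2 ≠ [] then (st.1 ++ [st.2], []) else st)
  else
    (st.1, st.2 ++ [line])

-- B's per-block paragraph: fold merge over the block, keep it if non-empty
def pvRenderBlock (block : List String) : Option String :=
  let cur := block.foldl pvMergeB ""
  if cur = "" then none else some (PySem.Str.strip cur)

def reconstruir_paragrafos_pyppdf2_py_alt (raw_text : String) : String :=
  let st := (PySem.Str.splitlines raw_text).foldl pvBlocksStep ([], [])
  let blocks := if st.2 ≠ [] then st.1 ++ [st.2] else st.1
  PySem.Str.join "\n\n" (blocks.filterMap pvRenderBlock)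

-- ===== PRECONDITION & SPEC =====
def Spec_reconstruir_paragrafos_pyppdf2_py (raw_text : String) (out : String) : Prop := out = reconstruir_paragrafos_pyppdf2_py_alt raw_text
instance (raw_text : String) (out : String) : Decidable (Spec_reconstruir_paragrafos_pyppdf2_py raw_text out) := by unfold Spec_reconstruir_paragrafos_pyppdf2_py; infer_instance

-- ===== CLAIM (what is proved, stated in full; the proofs are below) =====
def Claim_equal_reconstruir_paragrafos_pyppdf2_py : Prop := ∀ (raw_text : String), Dom_reconstruir_paragrafos_pyppdf2_py raw_text → Spec_reconstruir_paragrafos_pyppdf2_py raw_text (reconstruir_paragrafos_pyppdf2_py raw_text)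

-- ===== LEMMAS AND PROOFS =====

-- A's finalisation of its loop state / B's finalisation of the block splitter
def pvFinalA (st : List String × String) : List String :=
  if st.2 != "" then st.1 ++ [PySem.Str.strip st.2] else st.1

def pvFinalB (st : List (List String) × List String) : List (List String) :=
  if st.2 ≠ [] then st.1 ++ [st.2] else st.1

-- the blocks accumulator is a prefix: folding from (o, acc) just prepends o
theorem pvBlocks_out (ls : List String) (o : List (List String)) (acc : List String) :
    List.foldl pvBlocksStep (o, acc) ls
      = (o ++ (List.foldl pvBlocksStep ([], acc) ls).1, (List.foldl pvBlocksStep ([], acc) ls).2) := by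
  induction ls generalizing o acc with
  | nil => simp only [List.foldl_nil, List.append_nil]
  | cons l ls ih =>
    simp only [List.foldl_cons]
    by_cases hb : PySem.Str.strip l = ""
    · by_cases ha : acc = []
      · subst ha
        rw [show pvBlocksStep (o, []) l = (o, []) by simp [pvBlocksStep, hb],
            show pvBlocksStep (([] : List (List String)), []) l = ([], []) by simp [pvBlocksStep, hb]]
        exact ih o []
      · rw [show pvBlocksStep (o, acc) l = (o ++ [acc], []) by simp [pvBlocksStep, hb, ha],
            show pvBlocksStep (([] : List (List String)), acc) l = ([acc], []) by simp [pvBlocksStep, hb, ha],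
            ih, ih [acc] []]
        simp
    · rw [show pvBlocksStep (o, acc) l = (o, acc ++ [l]) by simp [pvBlocksStep, hb],
          show pvBlocksStep (([] : List (List String)), acc) l = ([], acc ++ [l]) by simp [pvBlocksStep, hb]]
      exact ih o (acc ++ [l])

-- on a non-blank line A's step is exactly B's merge, paragraphs untouched
theorem pvStepA_merge (p : List String) (cur line : String) (h : PySem.Str.strip line ≠ "") :
    pvStepA (p, cur) line = (p, pvMergeB cur line) := by
  have h' : (PySem.Str.strip line != "") = true := by simp [h]
  simp only [pvStepA, pvMergeB, if_neg h, h', Bool.true_and]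
  split_ifs <;> rfl

-- main invariant: A's flat pass, started with paragraphs p and current paragraph equal to
-- the merge-fold of the pending block acc, produces p ++ B's rendered blocks
theorem pvMain (ls : List String) (p : List String) (acc : List String) :
    pvFinalA (List.foldl pvStepA (p, acc.foldl pvMergeB "") ls)
      = p ++ (pvFinalB (List.foldl pvBlocksStep ([], acc) ls)).filterMap pvRenderBlock := by
  induction ls generalizing p acc with
  | nil =>
    by_cases ha : acc = []
    · simp [ha, pvFinalA, pvFinalB, pvRenderBlock]
    · by_cases hc : acc.foldl pvMergeB "" = "" <;>
        simp [ha, hc, pvFinalA, pvFinalB, pvRenderBlock]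
  | cons l ls ih =>
    simp only [List.foldl_cons]
    by_cases hb : PySem.Str.strip l = ""
    · have hstep : ∀ cur : String, pvStepA (p, cur) l
          = (p ++ (if cur = "" then [] else [PySem.Str.strip cur]), "") := by
        intro cur; by_cases hc : cur = "" <;> simp [pvStepA, hb, hc]
      rw [hstep]
      by_cases ha : acc = []
      · have : pvBlocksStep (([] : List (List String)), acc) l = ([], []) := by
          simp [pvBlocksStep, hb, ha]
        rw [this]
        simpa [ha] using ih p []
      · have : pvBlocksStep (([] : List (List String)), acc) l = ([acc], []) := by
          simp [pvBlocksStep, hb, ha]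
        rw [this, pvBlocks_out ls [acc] []]
        have hfin : pvFinalB ([acc] ++ (List.foldl pvBlocksStep ([], []) ls).1,
            (List.foldl pvBlocksStep ([], []) ls).2)
            = acc :: pvFinalB (List.foldl pvBlocksStep ([], []) ls) := by
          unfold pvFinalB; split_ifs <;> simp
        rw [hfin]
        have ih' := ih (p ++ (if acc.foldl pvMergeB "" = "" then [] else [PySem.Str.strip (acc.foldl pvMergeB "")])) []
        simp only [List.foldl_nil] at ih' ⊢
        rw [ih']
        by_cases hc : acc.foldl pvMergeB "" = "" <;>
          simp [pvRenderBlock, hc]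
    · rw [pvStepA_merge p _ l hb,
          show pvMergeB (acc.foldl pvMergeB "") l = (acc ++ [l]).foldl pvMergeB "" by
            simp [List.foldl_append],
          show pvBlocksStep (([] : List (List String)), acc) l = ([], acc ++ [l]) by
            simp [pvBlocksStep, hb]]
      exact ih p (acc ++ [l])

-- ===== VERDICT (by name: the statement is the Claim_ definition above) =====
theorem reconstruir_paragrafos_pyppdf2_py_spec : Claim_equal_reconstruir_paragrafos_pyppdf2_py := by
  intro raw_text _
  show PySem.Str.join "\n\n" (pvFinalA (List.foldl pvStepA ([], "") (PySem.Str.splitlines raw_text)))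
      = PySem.Str.join "\n\n"
          ((pvFinalB (List.foldl pvBlocksStep ([], []) (PySem.Str.splitlines raw_text))).filterMap pvRenderBlock)
  have h := pvMain (PySem.Str.splitlines raw_text) [] []
  simp only [List.foldl_nil, List.nil_append] at h
  rw [h]
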